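-- pv_equiv track=rewrite | github.com/Tatsumaki2024/Steganography-for-converting-TXT-text-files-into-PNG-image-files- | Convert_images_to_text_or_convert_text_to_images.py | _compute_dimensions
-- ===== SOURCE A (Python) =====
-- import math
-- from typing import Callable, Dict, Iterable, List, Optional, Tuple
--
-- def _compute_dimensions(num_pixels: int) -> Tuple[int, int]:
--     """根据像素数量计算接近正方形的宽度和高度。"""
--     side = int(math.sqrt(num_pixels))
--     width = side
--     height = side
--     while width * height < num_pixels:
--         width += 1
--         if width * height < num_pixels:
--             height += 1
--     return width, height
-- ===== SOURCE B (Python) =====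
-- import math
--
--
-- def _compute_dimensions(num_pixels):
--     """Closed-form near-square dimensions: the while-loop of the original runs
--     at most once, so it is replaced by a three-branch conditional."""
--     side = int(math.sqrt(num_pixels))
--     if side * side >= num_pixels:
--         return side, side
--     if side * (side + 1) >= num_pixels:
--         return side + 1, side
--     return side + 1, side + 1
-- ===== Notes on version B (the rewrite author's own statement) =====
-- stated objective: simpler
-- what changed: Replaced the while-loop (which can only iterate once, since side = isqrt) by a closed-form three-branch conditional on side*side and side*(side+1).
import Mathlib
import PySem

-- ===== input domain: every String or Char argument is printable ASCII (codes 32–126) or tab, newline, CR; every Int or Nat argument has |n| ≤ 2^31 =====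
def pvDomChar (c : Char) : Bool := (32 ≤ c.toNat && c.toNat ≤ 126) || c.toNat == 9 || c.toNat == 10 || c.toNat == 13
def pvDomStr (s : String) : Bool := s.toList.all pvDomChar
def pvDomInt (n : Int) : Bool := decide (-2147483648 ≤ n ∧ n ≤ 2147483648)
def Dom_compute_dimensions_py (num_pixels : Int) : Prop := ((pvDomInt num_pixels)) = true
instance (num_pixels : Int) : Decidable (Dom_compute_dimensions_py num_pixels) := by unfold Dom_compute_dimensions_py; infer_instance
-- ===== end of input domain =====

-- B replaces A's while-loop (which iterates at most once) by a closed-form three-branch conditional; objective: simpler.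

-- ===== PORT A =====
-- `int(math.sqrt(num_pixels))` is ported as `Int.sqrt`: exact on the domain (0 ≤ n ≤ 2^31),
-- where the double-precision sqrt is close enough that truncation equals the integer sqrt.
-- The while-loop is ported with a fuel parameter large enough to never run out on admitted inputs.
def pvLoopA (fuel : Nat) (num_pixels width height : Int) : Int × Int :=
  match fuel with
  | 0 => (width, height)
  | fuel + 1 =>
    if width * height < num_pixels then
      let width := width + 1
      let height := if width * height < num_pixels then height + 1 else height
      pvLoopA fuel num_pixels width height
    else (width, height)

def compute_dimensions_py (num_pixels : Int) : Int × Int :=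
  let side := Int.sqrt num_pixels
  pvLoopA (num_pixels.toNat + 2) num_pixels side side

-- ===== PORT B =====
def compute_dimensions_py_alt (num_pixels : Int) : Int × Int :=
  let side := Int.sqrt num_pixels
  if side * side ≥ num_pixels then (side, side)
  else if side * (side + 1) ≥ num_pixels then (side + 1, side)
  else (side + 1, side + 1)

-- ===== PRECONDITION & SPEC =====
-- A raises ValueError (math domain error) on negative input; Pre_ excludes exactly those.
def Pre_compute_dimensions_py (num_pixels : Int) : Prop := 0 ≤ num_pixels
instance (num_pixels : Int) : Decidable (Pre_compute_dimensions_py num_pixels) := by unfold Pre_compute_dimensions_py; infer_instance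
def pvWitness_compute_dimensions_py : Int := 10

def Spec_compute_dimensions_py (num_pixels : Int) (out : Int × Int) : Prop := out = compute_dimensions_py_alt num_pixels
instance (num_pixels : Int) (out : Int × Int) : Decidable (Spec_compute_dimensions_py num_pixels out) := by unfold Spec_compute_dimensions_py; infer_instance

-- ===== CLAIM (what is proved, stated in full; the proofs are below) =====
def Claim_equal_compute_dimensions_py : Prop := ∀ (num_pixels : Int), Dom_compute_dimensions_py num_pixels → Pre_compute_dimensions_py num_pixels → Spec_compute_dimensions_py num_pixels (compute_dimensions_py num_pixels)

-- ===== LEMMAS AND PROOFS =====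

-- If the loop condition is already false, the loop returns its state unchanged, for any fuel.
theorem pvLoopA_exit (fuel : Nat) (n w h : Int) (hc : ¬ w * h < n) :
    pvLoopA fuel n w h = (w, h) := by
  cases fuel with
  | zero => rfl
  | succ fuel => simp [pvLoopA, hc]

theorem sqrt_lower (n : Int) (hn : 0 ≤ n) : Int.sqrt n * Int.sqrt n ≤ n := by
  unfold Int.sqrt
  have h : ((Nat.sqrt n.toNat * Nat.sqrt n.toNat : Nat) : Int) ≤ (n.toNat : Int) :=
    Int.ofNat_le.mpr (by simpa [pow_two] using Nat.sqrt_le' n.toNat)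
  push_cast at h
  omega

theorem sqrt_upper (n : Int) : n < (Int.sqrt n + 1) * (Int.sqrt n + 1) := by
  unfold Int.sqrt
  have h : ((n.toNat : Nat) : Int) < (((Nat.sqrt n.toNat + 1) * (Nat.sqrt n.toNat + 1) : Nat) : Int) :=
    Int.ofNat_lt.mpr (by simpa [pow_two, Nat.succ_eq_add_one] using Nat.lt_succ_sqrt' n.toNat)
  push_cast at h
  exact lt_of_le_of_lt (Int.self_le_toNat n) h

-- ===== VERDICT (by name: the statement is the Claim_ definition above) =====
theorem compute_dimensions_py_spec : Claim_equal_compute_dimensions_py := by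
  intro n _ hpre
  show compute_dimensions_py n = compute_dimensions_py_alt n
  unfold compute_dimensions_py compute_dimensions_py_alt
  set s := Int.sqrt n with hs
  have hlow : s * s ≤ n := sqrt_lower n hpre
  have hup : n < (s + 1) * (s + 1) := sqrt_upper n
  have e2 : (s + 1) * (s + 1) = s * s + s + s + 1 := by ring
  have e3 : (s + 1) * s = s * s + s := by ring
  have e4 : s * (s + 1) = s * s + s := by ring
  by_cases h1 : s * s < n
  · show pvLoopA (n.toNat + 1 + 1) n s s = _
    rw [show pvLoopA (n.toNat + 1 + 1) n s s
         = if s * s < n then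
             pvLoopA (n.toNat + 1) n (s + 1) (if (s + 1) * s < n then s + 1 else s)
           else (s, s) from rfl]
    rw [if_pos h1]
    by_cases h2 : (s + 1) * s < n
    · rw [if_pos h2, pvLoopA_exit _ _ _ _ (by omega)]
      simp only [ge_iff_le]
      rw [if_neg (by omega), if_neg (by omega)]
    · rw [if_neg h2, pvLoopA_exit _ _ _ _ h2]
      simp only [ge_iff_le]
      rw [if_neg (by omega), if_pos (by omega)]
  · rw [pvLoopA_exit _ _ _ _ h1]
    simp only [ge_iff_le]
    rw [if_pos (by omega)]
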